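-- pv_equiv track=rewrite | github.com/streamer-AP/research-figures | skills/banana-paper-illustration/scripts/generate_banana_illustration.py | detect_title
-- ===== SOURCE A (Python) =====
-- def detect_title(text: str) -> str:
--     for line in text.splitlines():
--         raw = line.strip()
--         if raw.startswith("#"):
--             return raw.lstrip("#").strip()
--     for line in text.splitlines():
--         raw = line.strip()
--         if raw and len(raw) <= 80:
--             return raw
--     return "Untitled Research Figure"
-- ===== SOURCE B (Python) =====
-- def detect_title(text: str) -> str:
--     fallback = None
--     for line in text.splitlines():
--         raw = line.strip()
--         if raw.startswith("#"):
--             return raw.lstrip("#").strip()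
--         if fallback is None and raw and len(raw) <= 80:
--             fallback = raw
--     return fallback if fallback is not None else "Untitled Research Figure"
-- ===== Notes on version B (the rewrite author's own statement) =====
-- stated objective: simpler
-- what changed: Replaces A's two sequential full scans of the lines (one for headings, one for the first short line) with a single pass that carries the first short nonempty line as an accumulator and returns only headings early.
import Mathlib
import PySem

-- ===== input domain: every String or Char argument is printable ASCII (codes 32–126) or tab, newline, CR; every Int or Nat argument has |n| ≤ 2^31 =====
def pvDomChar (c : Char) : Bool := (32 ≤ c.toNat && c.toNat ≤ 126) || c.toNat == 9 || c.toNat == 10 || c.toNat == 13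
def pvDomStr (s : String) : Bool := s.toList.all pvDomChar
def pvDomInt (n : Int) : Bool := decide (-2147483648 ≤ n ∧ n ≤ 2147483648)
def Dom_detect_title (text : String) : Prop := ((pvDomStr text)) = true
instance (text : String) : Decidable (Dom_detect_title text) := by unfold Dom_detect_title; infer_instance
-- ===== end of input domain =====

-- B replaces A's two sequential scans by one pass that carries the first short line as a fallback accumulator (objective: simpler).

-- raw.lstrip("#").strip(): lstrip with the single-char set "#" is exactly dropWhile (· == '#') on the code points
def pvHeadingTitle (raw : String) : String :=
  PySem.Str.strip (String.ofList (raw.toList.dropWhile (· == '#')))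

-- ===== PORT A =====
-- first loop of A: return the transformed heading of the first '#'-line, if any
def pvHeadLoopA : List String → Option String
  | [] => none
  | line :: rest =>
      let raw := PySem.Str.strip line
      if PySem.Str.startswith raw "#" then some (pvHeadingTitle raw)
      else pvHeadLoopA rest

-- second loop of A: first stripped line that is nonempty and of length ≤ 80
def pvShortLoopA : List String → Option String
  | [] => none
  | line :: rest =>
      let raw := PySem.Str.strip line
      if raw ≠ "" ∧ PySem.Str.len raw ≤ 80 then some raw
      else pvShortLoopA rest

def detect_title (text : String) : String :=
  match pvHeadLoopA (PySem.Str.splitlines text) with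
  | some t => t
  | none =>
    match pvShortLoopA (PySem.Str.splitlines text) with
    | some r => r
    | none => "Untitled Research Figure"

-- ===== PORT B =====
-- single pass: headings return immediately; the first short nonempty line is stored in `fallback`
def pvLoopB : List String → Option String → String
  | [], fallback => fallback.getD "Untitled Research Figure"
  | line :: rest, fallback =>
      let raw := PySem.Str.strip line
      if PySem.Str.startswith raw "#" then pvHeadingTitle raw
      else
        pvLoopB rest
          (if fallback = none ∧ raw ≠ "" ∧ PySem.Str.len raw ≤ 80 then some raw else fallback)

def detect_title_alt (text : String) : String :=
  pvLoopB (PySem.Str.splitlines text) none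

-- ===== PRECONDITION & SPEC =====
def Spec_detect_title (text : String) (out : String) : Prop := out = detect_title_alt text
instance (text : String) (out : String) : Decidable (Spec_detect_title text out) := by unfold Spec_detect_title; infer_instance

-- ===== CLAIM (what is proved, stated in full; the proofs are below) =====
def Claim_equal_detect_title : Prop := ∀ (text : String), Dom_detect_title text → Spec_detect_title text (detect_title text)

-- ===== LEMMAS AND PROOFS =====

-- the single pass with accumulator computes A's heading-first, then fallback-or-short-line result
theorem pvLoopB_eq (ls : List String) (fb : Option String) :
    pvLoopB ls fb =
      match pvHeadLoopA ls with
      | some t => t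
      | none => (fb.or (pvShortLoopA ls)).getD "Untitled Research Figure" := by
  induction ls generalizing fb with
  | nil => cases fb <;> simp [pvLoopB, pvHeadLoopA, pvShortLoopA]
  | cons line rest ih =>
    cases fb <;>
      simp only [pvLoopB, pvHeadLoopA, pvShortLoopA, ih] <;>
      split_ifs <;> simp_all <;> omega

theorem detect_title_spec : Claim_equal_detect_title := by
  intro text _
  unfold Spec_detect_title detect_title detect_title_alt
  rw [pvLoopB_eq]
  cases pvHeadLoopA (PySem.Str.splitlines text) <;>
    cases pvShortLoopA (PySem.Str.splitlines text) <;> simp
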